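-- pv_equiv track=rewrite | github.com/2400ad/xls | maptest.py | generate_send_sql
-- ===== SOURCE A (Python) =====
-- def generate_send_sql(column_list, columns_info, base_query):
--     """송신 SQL 생성
--
--     Args:
--         column_list: 컬럼 목록
--         columns_info: 컬럼 정보 딕셔너리
--         base_query: 기본 쿼리 ($D$3에 해당)
--
--     Returns:
--         생성된 SQL 문자열
--     """
--     # 필수 시스템 컬럼 추가 (항상 처음에 포함)
--     sql_parts = ["EAI_SEQ_ID", "DATA_INTERFACE_TYPE_CODE"]
--
--     # 사용자가 지정한 컬럼들 추가
--     for col in column_list: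
--         if not col:  # 빈 컬럼은 건너뜀
--             continue
--
--         if col not in columns_info:
--             continue
--
--         col_info = columns_info[col]
--         # DATE 타입인 경우 TO_CHAR 변환 추가
--         if col_info['type'] == 'DATE':
--             sql_parts.append(f"TO_CHAR({col}, 'YYYYMMDDHH24MISS')")
--         else:
--             sql_parts.append(col)
--
--     # 컬럼들을 2개씩 그룹화하여 포매팅
--     formatted_parts = []
--     for i in range(0, len(sql_parts), 2):
--         if i + 1 < len(sql_parts):
--             formatted_parts.append(f"    {sql_parts[i]}, {sql_parts[i+1]}")
--         else:
--             formatted_parts.append(f"    {sql_parts[i]}")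
--
--     # SQL 문 조합
--     if base_query:
--         sql = f"{base_query}\n"
--     else:
--         sql = "SELECT\n"
--     sql += ",\n".join(formatted_parts)
--     return sql
-- ===== SOURCE B (Python) =====
-- def generate_send_sql(column_list, columns_info, base_query):
--     """Single-pass variant: stream items and pair them with a pending buffer."""
--     def items():
--         yield "EAI_SEQ_ID"
--         yield "DATA_INTERFACE_TYPE_CODE"
--         for col in column_list:
--             if col and col in columns_info:
--                 if columns_info[col]['type'] == 'DATE':
--                     yield f"TO_CHAR({col}, 'YYYYMMDDHH24MISS')"
--                 else:
--                     yield col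
--     formatted_parts = []
--     pending = None
--     for item in items():
--         if pending is None:
--             pending = item
--         else:
--             formatted_parts.append(f"    {pending}, {item}")
--             pending = None
--     if pending is not None:
--         formatted_parts.append(f"    {pending}")
--     header = f"{base_query}\n" if base_query else "SELECT\n"
--     return header + ",\n".join(formatted_parts)
-- ===== Notes on version B (the rewrite author's own statement) =====
-- stated objective: alternative
-- what changed: A builds the full sql_parts list and then pairs it in a second index-driven range(0,len,2) loop; B streams the items (two system columns, then each kept column) through a single pass with a one-element pending buffer that emits a formatted pair as soon as two items are seen and flushes a trailing single.
import Mathlib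
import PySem

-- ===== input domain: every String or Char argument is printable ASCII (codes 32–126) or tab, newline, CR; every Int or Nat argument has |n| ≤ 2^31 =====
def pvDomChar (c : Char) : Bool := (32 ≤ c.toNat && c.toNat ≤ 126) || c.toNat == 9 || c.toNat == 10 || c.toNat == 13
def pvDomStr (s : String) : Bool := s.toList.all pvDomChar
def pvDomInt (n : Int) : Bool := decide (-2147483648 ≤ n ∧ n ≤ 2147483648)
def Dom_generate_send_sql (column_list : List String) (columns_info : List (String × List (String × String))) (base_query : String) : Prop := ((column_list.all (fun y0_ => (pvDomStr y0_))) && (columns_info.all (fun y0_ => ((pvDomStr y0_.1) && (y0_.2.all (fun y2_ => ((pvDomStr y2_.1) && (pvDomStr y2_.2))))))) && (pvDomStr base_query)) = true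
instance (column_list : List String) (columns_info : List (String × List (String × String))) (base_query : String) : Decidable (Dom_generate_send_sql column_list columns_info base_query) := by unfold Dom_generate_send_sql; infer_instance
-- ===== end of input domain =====

-- B fuses A's two passes (build sql_parts, then pair by index) into one streamed pairing pass; objective: alternative decomposition, same cost.

-- ===== PORT A =====
def generate_send_sql (column_list : List String) (columns_info : List (String × List (String × String))) (base_query : String) : String :=
  let sql_parts := column_list.foldl (fun acc col =>
    if col = "" then acc
    else if PySem.Dict.contains (PySem.Dict.ofList columns_info) col = false then acc
    else if PySem.Dict.getD (PySem.Dict.ofList (PySem.Dict.getD (PySem.Dict.ofList columns_info) col [])) "type" "" = "DATE" then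
      acc ++ ["TO_CHAR(" ++ col ++ ", 'YYYYMMDDHH24MISS')"]
    else acc ++ [col]) ["EAI_SEQ_ID", "DATA_INTERFACE_TYPE_CODE"]
  let formatted_parts := (PySem.List.pyRange 0 (PySem.List.len sql_parts) 2).foldl (fun acc i =>
    if i + 1 < PySem.List.len sql_parts then
      acc ++ ["    " ++ PySem.List.pyGetD sql_parts i "" ++ ", " ++ PySem.List.pyGetD sql_parts (i + 1) ""]
    else
      acc ++ ["    " ++ PySem.List.pyGetD sql_parts i ""]) []
  let sql := if base_query ≠ "" then base_query ++ "\n" else "SELECT\n"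
  sql ++ PySem.Str.join ",\n" formatted_parts

-- ===== PORT B =====
-- the item stream: two fixed system columns, then each kept (non-empty, known) column, DATE-wrapped
def pvSendItems (column_list : List String) (columns_info : List (String × List (String × String))) : List String :=
  "EAI_SEQ_ID" :: "DATA_INTERFACE_TYPE_CODE" ::
  column_list.filterMap (fun col =>
    if col ≠ "" ∧ PySem.Dict.contains (PySem.Dict.ofList columns_info) col = true then
      some (if PySem.Dict.getD (PySem.Dict.ofList (PySem.Dict.getD (PySem.Dict.ofList columns_info) col [])) "type" "" = "DATE" then
              "TO_CHAR(" ++ col ++ ", 'YYYYMMDDHH24MISS')"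
            else col)
    else none)

-- the single pairing pass with a one-element pending buffer
def pvPairLoop : Option String → List String → List String
  | none, [] => []
  | some p, [] => ["    " ++ p]
  | none, x :: xs => pvPairLoop (some x) xs
  | some p, x :: xs => ("    " ++ p ++ ", " ++ x) :: pvPairLoop none xs

def generate_send_sql_alt (column_list : List String) (columns_info : List (String × List (String × String))) (base_query : String) : String :=
  let formatted_parts := pvPairLoop none (pvSendItems column_list columns_info)
  (if base_query ≠ "" then base_query ++ "\n" else "SELECT\n") ++ PySem.Str.join ",\n" formatted_parts

-- ===== PRECONDITION & SPEC =====
-- Pre_ excludes only inputs where Python A raises KeyError: a selected column whose info dict lacks the 'type' key.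
def Pre_generate_send_sql (column_list : List String) (columns_info : List (String × List (String × String))) (base_query : String) : Prop :=
  ∀ col ∈ column_list, col ≠ "" →
    ((PySem.Dict.get? (PySem.Dict.ofList columns_info) col).all (fun info => PySem.Dict.contains (PySem.Dict.ofList info) "type")) = true
instance (column_list : List String) (columns_info : List (String × List (String × String))) (base_query : String) : Decidable (Pre_generate_send_sql column_list columns_info base_query) := by unfold Pre_generate_send_sql; infer_instance

def pvWitness_generate_send_sql : List String × (List (String × List (String × String))) × String :=
  (["C1", "C2"], [("C1", [("type", "DATE")]), ("C2", [("type", "VARCHAR2")])], "")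

def Spec_generate_send_sql (column_list : List String) (columns_info : List (String × List (String × String))) (base_query : String) (out : String) : Prop := out = generate_send_sql_alt column_list columns_info base_query
instance (column_list : List String) (columns_info : List (String × List (String × String))) (base_query : String) (out : String) : Decidable (Spec_generate_send_sql column_list columns_info base_query out) := by unfold Spec_generate_send_sql; infer_instance

-- ===== CLAIM (what is proved, stated in full; the proofs are below) =====
def Claim_equal_generate_send_sql : Prop := ∀ (column_list : List String) (columns_info : List (String × List (String × String))) (base_query : String), Dom_generate_send_sql column_list columns_info base_query → Pre_generate_send_sql column_list columns_info base_query → Spec_generate_send_sql column_list columns_info base_query (generate_send_sql column_list columns_info base_query)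

-- ===== LEMMAS AND PROOFS =====

-- proof-only reference shape: pairing a list two at a time
def pvChunk2 : List String → List String
  | [] => []
  | [x] => ["    " ++ x]
  | x :: y :: r => ("    " ++ x ++ ", " ++ y) :: pvChunk2 r

lemma pvPairLoop_eq_chunk2 : ∀ xs : List String, pvPairLoop none xs = pvChunk2 xs := by
  intro xs
  induction xs using pvChunk2.induct <;> simp [pvPairLoop, pvChunk2, *]

-- A's first loop builds exactly B's item stream
lemma pvPartsA (ci : List (String × List (String × String))) (cl : List String) (acc : List String) :
    cl.foldl (fun acc col =>
      if col = "" then acc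
      else if PySem.Dict.contains (PySem.Dict.ofList ci) col = false then acc
      else if PySem.Dict.getD (PySem.Dict.ofList (PySem.Dict.getD (PySem.Dict.ofList ci) col [])) "type" "" = "DATE" then
        acc ++ ["TO_CHAR(" ++ col ++ ", 'YYYYMMDDHH24MISS')"]
      else acc ++ [col]) acc
    = acc ++ cl.filterMap (fun col =>
        if col ≠ "" ∧ PySem.Dict.contains (PySem.Dict.ofList ci) col = true then
          some (if PySem.Dict.getD (PySem.Dict.ofList (PySem.Dict.getD (PySem.Dict.ofList ci) col [])) "type" "" = "DATE" then
                  "TO_CHAR(" ++ col ++ ", 'YYYYMMDDHH24MISS')"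
                else col)
        else none) := by
  induction cl generalizing acc with
  | nil => simp
  | cons c t ih =>
    simp only [List.foldl_cons, List.filterMap_cons]
    split_ifs with h1 h2 h3 <;> simp_all

-- the Nat-level pairing fact behind A's index loop
lemma pvMapRangeChunk : ∀ xs : List String,
    (List.range ((xs.length + 1) / 2)).map (fun k =>
      if 2 * k + 1 < xs.length then
        "    " ++ xs.getD (2 * k) "" ++ ", " ++ xs.getD (2 * k + 1) ""
      else
        "    " ++ xs.getD (2 * k) "") = pvChunk2 xs := by
  intro xs
  induction xs using pvChunk2.induct with
  | case1 => simp [pvChunk2]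
  | case2 x => simp [pvChunk2]
  | case3 x y r ih =>
    have hlen : (((x :: y :: r).length + 1) / 2) = (r.length + 1) / 2 + 1 := by
      simp [List.length_cons]; omega
    rw [hlen, List.range_succ_eq_map, List.map_cons, List.map_map]
    have hfun : ((fun k =>
        if 2 * k + 1 < (x :: y :: r).length then
          "    " ++ (x :: y :: r).getD (2 * k) "" ++ ", " ++ (x :: y :: r).getD (2 * k + 1) ""
        else
          "    " ++ (x :: y :: r).getD (2 * k) "") ∘ Nat.succ)
        = (fun k =>
        if 2 * k + 1 < r.length then
          "    " ++ r.getD (2 * k) "" ++ ", " ++ r.getD (2 * k + 1) ""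
        else
          "    " ++ r.getD (2 * k) "") := by
      funext k
      have hc : (2 * Nat.succ k + 1 < (x :: y :: r).length) ↔ (2 * k + 1 < r.length) := by
        simp [List.length_cons]; omega
      have hg1 : (x :: y :: r).getD (2 * Nat.succ k) "" = r.getD (2 * k) "" := by
        have h2 : 2 * Nat.succ k = 2 * k + 1 + 1 := by omega
        simp [h2]
      have hg2 : (x :: y :: r).getD (2 * Nat.succ k + 1) "" = r.getD (2 * k + 1) "" := by
        have h2 : 2 * Nat.succ k + 1 = (2 * k + 1) + 1 + 1 := by omega
        simp [h2]
      simp only [Function.comp_apply, hc, hg1, hg2]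
    rw [hfun, ih]
    simp [pvChunk2]

-- A's index-pair loop over any list equals pvChunk2
lemma pvFmtA (xs : List String) :
    (PySem.List.pyRange 0 (PySem.List.len xs) 2).foldl (fun acc i =>
      if i + 1 < PySem.List.len xs then
        acc ++ ["    " ++ PySem.List.pyGetD xs i "" ++ ", " ++ PySem.List.pyGetD xs (i + 1) ""]
      else
        acc ++ ["    " ++ PySem.List.pyGetD xs i ""]) []
    = pvChunk2 xs := by
  have hbody : (fun (acc : List String) (i : Int) =>
      if i + 1 < PySem.List.len xs then
        acc ++ ["    " ++ PySem.List.pyGetD xs i "" ++ ", " ++ PySem.List.pyGetD xs (i + 1) ""]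
      else
        acc ++ ["    " ++ PySem.List.pyGetD xs i ""])
      = (fun (acc : List String) (i : Int) => acc ++
          [if i + 1 < PySem.List.len xs then
            "    " ++ PySem.List.pyGetD xs i "" ++ ", " ++ PySem.List.pyGetD xs (i + 1) ""
          else
            "    " ++ PySem.List.pyGetD xs i ""]) := by
    funext acc i; split_ifs <;> rfl
  rw [hbody, PySem.List.foldl_append_singleton_eq_map, List.nil_append]
  rw [PySem.List.pyRange_of_pos 0 (PySem.List.len xs) (by norm_num), List.map_map]
  have hcnt : (if (0:Int) < PySem.List.len xs then (((PySem.List.len xs) - 0 + 2 - 1) / 2).toNat else 0)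
      = (xs.length + 1) / 2 := by
    simp [PySem.List.len_eq]
    split_ifs <;> omega
  rw [hcnt]
  rw [← pvMapRangeChunk xs]
  apply List.map_congr_left
  intro k _
  have e1 : PySem.List.pyGetD xs (0 + 2 * (k : Int)) "" = xs.getD (2 * k) "" := by
    rw [show (0 : Int) + 2 * (k : Int) = ((2 * k : Nat) : Int) by push_cast; ring,
      PySem.List.pyGetD_natCast]
  have e2 : PySem.List.pyGetD xs (0 + 2 * (k : Int) + 1) "" = xs.getD (2 * k + 1) "" := by
    rw [show (0 : Int) + 2 * (k : Int) + 1 = ((2 * k + 1 : Nat) : Int) by push_cast; ring,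
      PySem.List.pyGetD_natCast]
  have hcond : (0 + 2 * (k : Int) + 1 < PySem.List.len xs) ↔ (2 * k + 1 < xs.length) := by
    rw [PySem.List.len_eq]; omega
  simp only [Function.comp_apply, e1, e2, hcond]

-- ===== VERDICT (by name: the statement is the Claim_ definition above) =====
theorem generate_send_sql_spec : Claim_equal_generate_send_sql := by
  intro cl ci bq _ _
  unfold Spec_generate_send_sql generate_send_sql generate_send_sql_alt
  simp only [pvPartsA, pvFmtA, pvPairLoop_eq_chunk2, pvSendItems, List.cons_append,
    List.nil_append]
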